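-- pv_equiv track=rewrite | github.com/manumurali010/gst | src/utils/placeholder_registry.py | group_placeholders_by_category
-- ===== SOURCE A (Python) =====
-- from typing import List, Dict
--
-- def group_placeholders_by_category(placeholders: List[Dict]) -> Dict[str, List[Dict]]:
--     """Groups a flat list of placeholders into categories for UI rendering."""
--     grouped = {
--         "Taxpayer Information": [],
--         "Return Data & Analysis": [],
--         "Tables": [],
--         "Other / Detected": []
--     }
--
--     for p in placeholders:
--         name = p.get('name', '')
--         source = p.get('source', '')
--
--         if source == 'metadata':
--             grouped["Taxpayer Information"].append(p)
--         elif source == 'system':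
--             if p.get('type') == 'table':
--                 grouped["Tables"].append(p)
--             else:
--                 grouped["Return Data & Analysis"].append(p)
--         elif source == 'grid':
--             grouped["Return Data & Analysis"].append(p)
--         else:
--             grouped["Other / Detected"].append(p)
--
--     # Clean up empty categories
--     return {k: v for k, v in grouped.items() if v}
-- ===== SOURCE B (Python) =====
-- from typing import List, Dict
--
-- CATEGORY_ORDER = ("Taxpayer Information", "Return Data & Analysis",
--                   "Tables", "Other / Detected")
--
-- def _classify(p):
--     source = p.get('source', '')
--     if source == 'metadata':
--         return "Taxpayer Information"
--     if source == 'system':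
--         return "Tables" if p.get('type') == 'table' else "Return Data & Analysis"
--     if source == 'grid':
--         return "Return Data & Analysis"
--     return "Other / Detected"
--
-- def group_placeholders_by_category(placeholders: List[Dict]) -> Dict[str, List[Dict]]:
--     grouped = {cat: [p for p in placeholders if _classify(p) == cat]
--                for cat in CATEGORY_ORDER}
--     return {k: v for k, v in grouped.items() if v}
-- ===== Notes on version B (the rewrite author's own statement) =====
-- stated objective: alternative
-- what changed: Replaces the single pass that appends into four mutable accumulator lists with a pure classify(p) helper plus one filtering comprehension per fixed category; same ordering and empty-category drop.
import Mathlib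
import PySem

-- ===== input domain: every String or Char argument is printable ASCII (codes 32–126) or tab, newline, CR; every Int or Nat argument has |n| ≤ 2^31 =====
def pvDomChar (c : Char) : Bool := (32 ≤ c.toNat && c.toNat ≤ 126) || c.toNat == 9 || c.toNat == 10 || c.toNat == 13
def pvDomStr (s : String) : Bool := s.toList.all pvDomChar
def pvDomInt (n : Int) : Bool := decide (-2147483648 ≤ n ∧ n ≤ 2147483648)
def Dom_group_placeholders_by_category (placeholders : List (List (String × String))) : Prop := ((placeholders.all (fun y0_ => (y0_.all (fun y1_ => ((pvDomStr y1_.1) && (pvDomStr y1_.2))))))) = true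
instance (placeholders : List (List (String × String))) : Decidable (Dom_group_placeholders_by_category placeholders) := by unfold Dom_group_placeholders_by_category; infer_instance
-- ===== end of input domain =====

-- B replaces A's single pass into four mutable accumulators with a pure classify helper
-- plus one filtering pass per fixed category (objective: alternative decomposition; same cost class).
-- Python dicts are association lists here; lookup (`p.get(k)`) is first match.

-- shared dict-lookup helper (Python d.get(k) / d.get(k, dflt) on the assoc-list convention: first match)
def pvDictGet? (d : List (String × String)) (k : String) : Option String :=
  (d.find? (fun kv => kv.1 == k)).map Prod.snd

def pvDictGetD (d : List (String × String)) (k : String) (dflt : String) : String :=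
  (pvDictGet? d k).getD dflt

-- ===== PORT A =====
-- the body of A's for-loop, over the state (Taxpayer, ReturnData, Tables, Other)
def pvStepA (acc : List (List (String × String)) × List (List (String × String)) × List (List (String × String)) × List (List (String × String)))
    (p : List (String × String)) :
    List (List (String × String)) × List (List (String × String)) × List (List (String × String)) × List (List (String × String)) :=
  let _name := pvDictGetD p "name" ""   -- A reads `name` but never uses it
  let source := pvDictGetD p "source" ""
  if source == "metadata" then (acc.1 ++ [p], acc.2.1, acc.2.2.1, acc.2.2.2)
  else if source == "system" then
    (if pvDictGet? p "type" == some "table" then (acc.1, acc.2.1, acc.2.2.1 ++ [p], acc.2.2.2)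
     else (acc.1, acc.2.1 ++ [p], acc.2.2.1, acc.2.2.2))
  else if source == "grid" then (acc.1, acc.2.1 ++ [p], acc.2.2.1, acc.2.2.2)
  else (acc.1, acc.2.1, acc.2.2.1, acc.2.2.2 ++ [p])

def group_placeholders_by_category (placeholders : List (List (String × String))) : List (String × List (List (String × String))) :=
  let g := placeholders.foldl pvStepA ([], [], [], [])
  -- {k: v for k, v in grouped.items() if v}
  ([("Taxpayer Information", g.1), ("Return Data & Analysis", g.2.1),
    ("Tables", g.2.2.1), ("Other / Detected", g.2.2.2)]).filter (fun kv => !kv.2.isEmpty)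

-- ===== PORT B =====
def pvClassify (p : List (String × String)) : String :=
  let source := pvDictGetD p "source" ""
  if source == "metadata" then "Taxpayer Information"
  else if source == "system" then
    (if pvDictGet? p "type" == some "table" then "Tables" else "Return Data & Analysis")
  else if source == "grid" then "Return Data & Analysis"
  else "Other / Detected"

def group_placeholders_by_category_alt (placeholders : List (List (String × String))) : List (String × List (List (String × String))) :=
  let grouped := (["Taxpayer Information", "Return Data & Analysis", "Tables", "Other / Detected"]).map
    (fun cat => (cat, placeholders.filter (fun p => pvClassify p == cat)))
  grouped.filter (fun kv => !kv.2.isEmpty)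

-- ===== PRECONDITION & SPEC =====
def Spec_group_placeholders_by_category (placeholders : List (List (String × String))) (out : List (String × List (List (String × String)))) : Prop := out = group_placeholders_by_category_alt placeholders
instance (placeholders : List (List (String × String))) (out : List (String × List (List (String × String)))) : Decidable (Spec_group_placeholders_by_category placeholders out) := by unfold Spec_group_placeholders_by_category; infer_instance

-- ===== CLAIM (what is proved, stated in full; the proofs are below) =====
def Claim_equal_group_placeholders_by_category : Prop := ∀ (placeholders : List (List (String × String))), Dom_group_placeholders_by_category placeholders → Spec_group_placeholders_by_category placeholders (group_placeholders_by_category placeholders)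

-- ===== LEMMAS AND PROOFS =====

-- A's accumulating fold computes, for each category, exactly B's filter by pvClassify.
theorem pvFoldA_eq_filters (l : List (List (String × String))) :
    ∀ t r tb o : List (List (String × String)),
      l.foldl pvStepA (t, r, tb, o) =
        (t ++ l.filter (fun p => pvClassify p == "Taxpayer Information"),
         r ++ l.filter (fun p => pvClassify p == "Return Data & Analysis"),
         tb ++ l.filter (fun p => pvClassify p == "Tables"),
         o ++ l.filter (fun p => pvClassify p == "Other / Detected")) := by
  induction l with
  | nil => intro t r tb o; simp
  | cons p l ih =>
    intro t r tb o
    simp only [List.foldl_cons, List.filter_cons]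
    by_cases h1 : (pvDictGetD p "source" "" == "metadata") = true
    · rw [show pvStepA (t, r, tb, o) p = (t ++ [p], r, tb, o) by simp [pvStepA, h1]]
      rw [ih]; simp [pvClassify, h1]
    · by_cases h2 : (pvDictGetD p "source" "" == "system") = true
      · by_cases h3 : (pvDictGet? p "type" == some "table") = true
        · rw [show pvStepA (t, r, tb, o) p = (t, r, tb ++ [p], o) by simp [pvStepA, h1, h2, h3]]
          rw [ih]; simp [pvClassify, h1, h2, h3]
        · rw [show pvStepA (t, r, tb, o) p = (t, r ++ [p], tb, o) by simp [pvStepA, h1, h2, h3]]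
          rw [ih]; simp [pvClassify, h1, h2, h3]
      · by_cases h4 : (pvDictGetD p "source" "" == "grid") = true
        · rw [show pvStepA (t, r, tb, o) p = (t, r ++ [p], tb, o) by simp [pvStepA, h1, h2, h4]]
          rw [ih]; simp [pvClassify, h1, h2, h4]
        · rw [show pvStepA (t, r, tb, o) p = (t, r, tb, o ++ [p]) by simp [pvStepA, h1, h2, h4]]
          rw [ih]; simp [pvClassify, h1, h2, h4]

theorem group_placeholders_by_category_spec' (placeholders : List (List (String × String))) :
    group_placeholders_by_category placeholders = group_placeholders_by_category_alt placeholders := by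
  unfold group_placeholders_by_category group_placeholders_by_category_alt
  rw [pvFoldA_eq_filters placeholders [] [] [] []]
  simp [List.map]

-- ===== VERDICT (by name: the statement is the Claim_ definition above) =====
theorem group_placeholders_by_category_spec : Claim_equal_group_placeholders_by_category := by
  intro placeholders _
  exact group_placeholders_by_category_spec' placeholders
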